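-- pv_equiv track=rewrite | github.com/pranaysuyash/kenya-shif | dr_rishi_pattern_analyzer.py | _infer_facility_level_from_specialty
-- ===== SOURCE A (Python) =====
-- def _infer_facility_level_from_specialty(specialty: str, intervention: str) -> str:
--     """Infer facility level from specialty"""
--
--     specialty_lower = specialty.lower()
--     intervention_lower = intervention.lower()
--
--     # High complexity specialties
--     if any(term in specialty_lower for term in ['cardiothoracic', 'neurosurg', 'transplant']):
--         return "Level 5-6 (Specialized Hospital)"
--
--     # Medium complexity
--     if any(term in specialty_lower for term in ['orthop', 'urol', 'maxillo']):
--         return "Level 4-5 (County/Teaching Hospital)"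
--
--     # Lower complexity
--     if any(term in specialty_lower for term in ['general', 'ophthal']):
--         return "Level 3-4 (Health Center/County Hospital)"
--
--     # Emergency procedures
--     if any(term in intervention_lower for term in ['emergency', 'urgent']):
--         return "Level 4+ (County Hospital or higher)"
--
--     return "Level 4+ (County Hospital or higher)"
-- ===== SOURCE B (Python) =====
-- # Alternative algorithm: instead of an ordered chain of `in` substring tests, scan the
-- # lowercased specialty once position by position, testing which terms start at each
-- # offset and keeping the lowest (best) complexity tier seen; the emergency branch is
-- # dropped since it returns the same string as the default.
--
-- _TERMS = (
--     ("cardiothoracic", 0), ("neurosurg", 0), ("transplant", 0),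
--     ("orthop", 1), ("urol", 1), ("maxillo", 1),
--     ("general", 2), ("ophthal", 2),
-- )
--
-- _LABELS = (
--     "Level 5-6 (Specialized Hospital)",
--     "Level 4-5 (County/Teaching Hospital)",
--     "Level 3-4 (Health Center/County Hospital)",
--     "Level 4+ (County Hospital or higher)",
-- )
--
--
-- def _infer_facility_level_from_specialty(specialty: str, intervention: str) -> str:
--     s = specialty.lower()
--     best = 3
--     for i in range(len(s)):
--         for term, tier in _TERMS:
--             if tier < best and s.startswith(term, i):
--                 best = tier
--     return _LABELS[best]
-- ===== Notes on version B (the rewrite author's own statement) =====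
-- stated objective: alternative
-- what changed: Replaced the ordered chain of `in` substring tests over two fields by a single position-by-position scan of the lowercased specialty that tests which terms start at each offset and keeps the lowest complexity tier in an accumulator, indexing a label table at the end; the emergency branch is dropped since it returns the same string as the default.
import Mathlib
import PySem

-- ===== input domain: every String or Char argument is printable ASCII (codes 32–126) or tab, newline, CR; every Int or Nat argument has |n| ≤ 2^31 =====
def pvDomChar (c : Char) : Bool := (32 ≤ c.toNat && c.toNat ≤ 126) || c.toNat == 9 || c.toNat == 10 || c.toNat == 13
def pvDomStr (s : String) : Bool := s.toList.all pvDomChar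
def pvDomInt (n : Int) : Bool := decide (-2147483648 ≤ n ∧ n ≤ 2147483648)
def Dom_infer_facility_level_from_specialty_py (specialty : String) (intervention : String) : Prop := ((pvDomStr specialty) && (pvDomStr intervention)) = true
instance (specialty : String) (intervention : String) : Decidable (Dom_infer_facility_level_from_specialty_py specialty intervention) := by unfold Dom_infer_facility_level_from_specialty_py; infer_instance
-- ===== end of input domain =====

-- B replaces A's ordered chain of substring (`in`) tests by a single position-by-position
-- scan of the lowercased specialty keeping the lowest matched complexity tier, then indexes
-- a label table; the emergency branch is dropped (it returns the same string as the default).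
-- Objective: alternative algorithm. B ignores `intervention`, which never affects A's result.


-- ===== PORT A =====
def infer_facility_level_from_specialty_py (specialty : String) (intervention : String) : String :=
  let specialty_lower := PySem.Str.lower specialty
  let intervention_lower := PySem.Str.lower intervention
  if ["cardiothoracic", "neurosurg", "transplant"].any (fun term => PySem.Str.isIn term specialty_lower) then
    "Level 5-6 (Specialized Hospital)"
  else if ["orthop", "urol", "maxillo"].any (fun term => PySem.Str.isIn term specialty_lower) then
    "Level 4-5 (County/Teaching Hospital)"
  else if ["general", "ophthal"].any (fun term => PySem.Str.isIn term specialty_lower) then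
    "Level 3-4 (Health Center/County Hospital)"
  else if ["emergency", "urgent"].any (fun term => PySem.Str.isIn term intervention_lower) then
    "Level 4+ (County Hospital or higher)"
  else
    "Level 4+ (County Hospital or higher)"

-- ===== PORT B =====
-- Source B's _TERMS table: (term, tier)
def pvTerms : List (List Char × Nat) :=
  [("cardiothoracic".toList, 0), ("neurosurg".toList, 0), ("transplant".toList, 0),
   ("orthop".toList, 1), ("urol".toList, 1), ("maxillo".toList, 1),
   ("general".toList, 2), ("ophthal".toList, 2)]

-- Source B's _LABELS table
def pvLabels : List String :=
  ["Level 5-6 (Specialized Hospital)",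
   "Level 4-5 (County/Teaching Hospital)",
   "Level 3-4 (Health Center/County Hospital)",
   "Level 4+ (County Hospital or higher)"]

-- inner loop body: `for term, tier in _TERMS: if tier < best and s.startswith(term, i): best = tier`
-- Python's s.startswith(term, i) with 0 ≤ i is exactly `term` being a prefix of s[i:] = cs.drop i.
def pvScanPos (cs : List Char) (best : Nat) (i : Nat) : Nat :=
  pvTerms.foldl (fun b tp => if tp.2 < b && PySem.Chars.startswith (cs.drop i) tp.1 then tp.2 else b) best

-- outer loop: `for i in range(len(s)): ...` starting from best = 3
def pvBest (cs : List Char) : Nat := (List.range cs.length).foldl (pvScanPos cs) 3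

def infer_facility_level_from_specialty_py_alt (specialty : String) (intervention : String) : String :=
  let cs := (PySem.Str.lower specialty).toList
  -- _LABELS[best]: pvBest cs ≤ 3 always (proved below), so the getD default is unreachable
  pvLabels.getD (pvBest cs) ""

-- ===== PRECONDITION & SPEC =====
def Spec_infer_facility_level_from_specialty_py (specialty : String) (intervention : String) (out : String) : Prop := out = infer_facility_level_from_specialty_py_alt specialty intervention
instance (specialty : String) (intervention : String) (out : String) : Decidable (Spec_infer_facility_level_from_specialty_py specialty intervention out) := by unfold Spec_infer_facility_level_from_specialty_py; infer_instance

-- ===== CLAIM (what is proved, stated in full; the proofs are below) =====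
def Claim_equal_infer_facility_level_from_specialty_py : Prop := ∀ (specialty : String) (intervention : String), Dom_infer_facility_level_from_specialty_py specialty intervention → Spec_infer_facility_level_from_specialty_py specialty intervention (infer_facility_level_from_specialty_py specialty intervention)

-- ===== LEMMAS AND PROOFS =====

-- the tier accumulator only ever decreases to a matched tier: characterize `result ≤ p`
theorem pv_foldl_tier_le_iff (ts : List (List Char × Nat)) (g : List Char) (b p : Nat) :
    (ts.foldl (fun b tp => if tp.2 < b && PySem.Chars.startswith g tp.1 then tp.2 else b) b) ≤ p
    ↔ b ≤ p ∨ ∃ tp ∈ ts, tp.2 ≤ p ∧ PySem.Chars.startswith g tp.1 = true := by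
  induction ts generalizing b with
  | nil => simp
  | cons hd tl ih =>
    simp only [List.foldl_cons, List.exists_mem_cons_iff]
    rw [ih]
    by_cases hc : (hd.2 < b && PySem.Chars.startswith g hd.1) = true
    · obtain ⟨h1, h2⟩ := Bool.and_eq_true_iff.mp hc
      rw [if_pos hc]
      simp only [h2, and_true]
      constructor
      · rintro (h | h)
        · exact Or.inr (Or.inl (by omega))
        · exact Or.inr (Or.inr h)
      · rintro (h | h | h)
        · exact Or.inl (by simp at h1; omega)
        · exact Or.inl h
        · exact Or.inr h
    · rw [if_neg hc]
      rcases Bool.and_eq_false_iff.mp (Bool.not_eq_true _ |>.mp hc) with h | h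
    -- case not (hd.2 < b): the middle disjunct implies b ≤ p; case startswith false: middle is absurd
      · simp only [decide_eq_false_iff_not, Nat.not_lt] at h
        constructor
        · rintro (hb | hE)
          · exact Or.inl hb
          · exact Or.inr (Or.inr hE)
        · rintro (hb | ⟨hle, _⟩ | hE)
          · exact Or.inl hb
          · exact Or.inl (by omega)
          · exact Or.inr hE
      · simp [h]
  
theorem pv_scanPos_le_iff (cs : List Char) (b i p : Nat) :
    pvScanPos cs b i ≤ p ↔ b ≤ p ∨ ∃ tp ∈ pvTerms, tp.2 ≤ p ∧ PySem.Chars.startswith (cs.drop i) tp.1 = true :=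
  pv_foldl_tier_le_iff pvTerms (cs.drop i) b p

theorem pv_fold_range_le_iff (cs : List Char) (L : List Nat) (b p : Nat) :
    L.foldl (pvScanPos cs) b ≤ p
    ↔ b ≤ p ∨ ∃ i ∈ L, ∃ tp ∈ pvTerms, tp.2 ≤ p ∧ PySem.Chars.startswith (cs.drop i) tp.1 = true := by
  induction L generalizing b with
  | nil => simp
  | cons hd tl ih =>
    simp only [List.foldl_cons, List.exists_mem_cons_iff]
    rw [ih, pv_scanPos_le_iff]
    exact or_assoc

-- a nonempty term is a prefix of some suffix cs.drop i with i < cs.length iff it is a substring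
theorem pv_exists_pos_iff_isIn (cs t : List Char) (ht : t ≠ []) :
    (∃ i ∈ List.range cs.length, PySem.Chars.startswith (cs.drop i) t = true)
    ↔ PySem.Chars.isIn t cs = true := by
  rw [← PySem.Chars.exists_prefix_drop_iff_isIn]
  simp only [List.mem_range, PySem.Chars.startswith_iff]
  constructor
  · rintro ⟨i, _, h⟩; exact ⟨i, h⟩
  · rintro ⟨j, h⟩
    by_cases hj : j < cs.length
    · exact ⟨j, hj, h⟩
    · exfalso
      have : cs.drop j = [] := List.drop_eq_nil_of_le (by omega)
      rw [this] at h
      exact ht (List.prefix_nil.mp h)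

theorem pv_best_le_iff (cs : List Char) (p : Nat) :
    pvBest cs ≤ p ↔ 3 ≤ p ∨ ∃ tp ∈ pvTerms, tp.2 ≤ p ∧ PySem.Chars.isIn tp.1 cs = true := by
  have hne : ∀ tp ∈ pvTerms, tp.1 ≠ [] := by decide
  rw [pvBest, pv_fold_range_le_iff]
  constructor
  · rintro (h | ⟨i, hi, tp, htp, hle, hsw⟩)
    · exact Or.inl h
    · exact Or.inr ⟨tp, htp, hle, (pv_exists_pos_iff_isIn cs tp.1 (hne tp htp)).mp ⟨i, hi, hsw⟩⟩
  · rintro (h | ⟨tp, htp, hle, hin⟩)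
    · exact Or.inl h
    · obtain ⟨i, hi, hsw⟩ := (pv_exists_pos_iff_isIn cs tp.1 (hne tp htp)).mpr hin
      exact Or.inr ⟨i, hi, tp, htp, hle, hsw⟩

theorem pv_best_le_three (cs : List Char) : pvBest cs ≤ 3 :=
  (pv_best_le_iff cs 3).mpr (Or.inl le_rfl)

theorem pv_best_le_zero_iff (cs : List Char) :
    pvBest cs ≤ 0 ↔ PySem.Chars.isIn "cardiothoracic".toList cs = true
      ∨ PySem.Chars.isIn "neurosurg".toList cs = true
      ∨ PySem.Chars.isIn "transplant".toList cs = true := by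
  rw [pv_best_le_iff]
  simp [pvTerms]

theorem pv_best_le_one_iff (cs : List Char) :
    pvBest cs ≤ 1 ↔ PySem.Chars.isIn "cardiothoracic".toList cs = true
      ∨ PySem.Chars.isIn "neurosurg".toList cs = true
      ∨ PySem.Chars.isIn "transplant".toList cs = true
      ∨ PySem.Chars.isIn "orthop".toList cs = true
      ∨ PySem.Chars.isIn "urol".toList cs = true
      ∨ PySem.Chars.isIn "maxillo".toList cs = true := by
  rw [pv_best_le_iff]
  simp [pvTerms]

theorem pv_best_le_two_iff (cs : List Char) :
    pvBest cs ≤ 2 ↔ PySem.Chars.isIn "cardiothoracic".toList cs = true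
      ∨ PySem.Chars.isIn "neurosurg".toList cs = true
      ∨ PySem.Chars.isIn "transplant".toList cs = true
      ∨ PySem.Chars.isIn "orthop".toList cs = true
      ∨ PySem.Chars.isIn "urol".toList cs = true
      ∨ PySem.Chars.isIn "maxillo".toList cs = true
      ∨ PySem.Chars.isIn "general".toList cs = true
      ∨ PySem.Chars.isIn "ophthal".toList cs = true := by
  rw [pv_best_le_iff]
  simp [pvTerms]

-- ===== VERDICT (by name: the statement is the Claim_ definition above) =====
theorem infer_facility_level_from_specialty_py_spec : Claim_equal_infer_facility_level_from_specialty_py := by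
  intro specialty intervention _
  unfold Spec_infer_facility_level_from_specialty_py
  unfold infer_facility_level_from_specialty_py infer_facility_level_from_specialty_py_alt
  simp only [List.any_cons, List.any_nil, Bool.or_false, PySem.Str.isIn_eq,
    PySem.Str.toList_lower, Bool.or_eq_true]
  set cs := PySem.Chars.lower specialty.toList with hcs
  split_ifs with hA hB hC hD
  · have h0 : pvBest cs = 0 := Nat.le_zero.mp ((pv_best_le_zero_iff cs).mpr hA)
    rw [h0]
    simp [pvLabels]
  · have h1 : pvBest cs ≤ 1 := (pv_best_le_one_iff cs).mpr
      (Or.inr (Or.inr (Or.inr hB)))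
    have h0 : ¬ pvBest cs ≤ 0 := fun h => hA ((pv_best_le_zero_iff cs).mp h)
    have hb : pvBest cs = 1 := by omega
    rw [hb]
    simp [pvLabels]
  · have h2 : pvBest cs ≤ 2 := (pv_best_le_two_iff cs).mpr
      (Or.inr (Or.inr (Or.inr (Or.inr (Or.inr (Or.inr hC))))))
    have h1 : ¬ pvBest cs ≤ 1 := fun h => by
      rcases (pv_best_le_one_iff cs).mp h with h'|h'|h'|h'|h'|h'
      · exact hA (Or.inl h')
      · exact hA (Or.inr (Or.inl h'))
      · exact hA (Or.inr (Or.inr h'))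
      · exact hB (Or.inl h')
      · exact hB (Or.inr (Or.inl h'))
      · exact hB (Or.inr (Or.inr h'))
    have hb : pvBest cs = 2 := by omega
    rw [hb]
    simp [pvLabels]
  · have h2 : ¬ pvBest cs ≤ 2 := fun h => by
      rcases (pv_best_le_two_iff cs).mp h with h'|h'|h'|h'|h'|h'|h'|h'
      · exact hA (Or.inl h')
      · exact hA (Or.inr (Or.inl h'))
      · exact hA (Or.inr (Or.inr h'))
      · exact hB (Or.inl h')
      · exact hB (Or.inr (Or.inl h'))
      · exact hB (Or.inr (Or.inr h'))
      · exact hC (Or.inl h')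
      · exact hC (Or.inr h')
    have hb : pvBest cs = 3 := by have := pv_best_le_three cs; omega
    rw [hb]
    simp [pvLabels]
  · have h2 : ¬ pvBest cs ≤ 2 := fun h => by
      rcases (pv_best_le_two_iff cs).mp h with h'|h'|h'|h'|h'|h'|h'|h'
      · exact hA (Or.inl h')
      · exact hA (Or.inr (Or.inl h'))
      · exact hA (Or.inr (Or.inr h'))
      · exact hB (Or.inl h')
      · exact hB (Or.inr (Or.inl h'))
      · exact hB (Or.inr (Or.inr h'))
      · exact hC (Or.inl h')
      · exact hC (Or.inr h')
    have hb : pvBest cs = 3 := by have := pv_best_le_three cs; omega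
    rw [hb]
    simp [pvLabels]
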